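-- pv_equiv track=rewrite | github.com/erjan/coding_exercises | lintcode/determine_if_string_is_uppercase_and_the_consecutive_characters_are_not_repeated.py | solution
-- ===== SOURCE A (Python) =====
-- def solution(var_str):
--     # Iterate through the string
--
--     for i in range(len(var_str)):
--         if var_str[i] < 'A' and var_str[i] >'Z':
--             return 'Dislikes'
--
--     # Determine if the character is in A ~ Z. If not, return 'Dislikes'
--
--     # Determine if this character is the last character
--         if i != len(var_str)-1:
--             if var_str[i] == var_str[i+1]:
--                 return 'Dislikes'
--     # Determine if this character is equal to the next character, and if so, return 'Dislikes'
--         else: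
--             continue
--     # If not, continue the for loop
--     return 'Likes'
-- ===== SOURCE B (Python) =====
-- def solution(var_str):
--     # Run-length encode the string, then like it iff every run has length 1.
--     runs = []
--     for c in var_str:
--         if runs and runs[-1][0] == c:
--             runs[-1] = (c, runs[-1][1] + 1)
--         else:
--             runs.append((c, 1))
--     return 'Likes' if all(n == 1 for _, n in runs) else 'Dislikes'
-- ===== Notes on version B (the rewrite author's own statement) =====
-- stated objective: simpler
-- what changed: B drops A's dead uppercase guard (a condition that is always false) and replaces the index/lookahead scan with a run-length encoding pass followed by a check that every run has length 1.
import Mathlib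
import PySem

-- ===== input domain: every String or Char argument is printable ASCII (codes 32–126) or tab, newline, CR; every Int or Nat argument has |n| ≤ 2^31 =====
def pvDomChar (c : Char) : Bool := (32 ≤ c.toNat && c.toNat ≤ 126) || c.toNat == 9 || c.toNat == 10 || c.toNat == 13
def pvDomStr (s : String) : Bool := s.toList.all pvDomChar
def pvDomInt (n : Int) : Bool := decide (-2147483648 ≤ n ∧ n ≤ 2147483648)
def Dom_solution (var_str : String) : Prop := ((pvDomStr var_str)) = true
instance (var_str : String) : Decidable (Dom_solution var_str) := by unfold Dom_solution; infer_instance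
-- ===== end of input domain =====

-- B drops A's dead uppercase guard (always false) and uses a run-length-encoding pass instead
-- of A's index/lookahead scan; objective: simpler.

-- ===== PORT A =====
-- the for-loop over range(len(var_str)), with early returns
def solutionLoopA (cs : List Char) : List Nat → String
  | [] => "Likes"
  | i :: rest =>
    if cs.getD i ' ' < 'A' ∧ 'Z' < cs.getD i ' ' then "Dislikes"
    else if i ≠ cs.length - 1 then
      if cs.getD i ' ' = cs.getD (i + 1) ' ' then "Dislikes"
      else solutionLoopA cs rest
    else solutionLoopA cs rest

def solution (var_str : String) : String :=
  solutionLoopA var_str.toList (List.range var_str.toList.length)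

-- ===== PORT B =====
-- one fold step of Source B's run-building loop (mutating the last run or appending a new one)
def solutionStepB (runs : List (Char × Nat)) (c : Char) : List (Char × Nat) :=
  match runs.getLast? with
  | some (d, n) => if d = c then runs.dropLast ++ [(c, n + 1)] else runs ++ [(c, 1)]
  | none => runs ++ [(c, 1)]

def solution_alt (var_str : String) : String :=
  if (var_str.toList.foldl solutionStepB []).all (fun p => p.2 == 1) then "Likes"
  else "Dislikes"

-- ===== PRECONDITION & SPEC =====
def Spec_solution (var_str : String) (out : String) : Prop := out = solution_alt var_str
instance (var_str : String) (out : String) : Decidable (Spec_solution var_str out) := by unfold Spec_solution; infer_instance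

-- ===== CLAIM (what is proved, stated in full; the proofs are below) =====
def Claim_equal_solution : Prop := ∀ (var_str : String), Dom_solution var_str → Spec_solution var_str (solution var_str)

-- ===== LEMMAS AND PROOFS =====

-- no adjacent equal characters
def adjOk : List Char → Bool
  | a :: b :: t => a != b && adjOk (b :: t)
  | _ => true

theorem char_guard_false (c : Char) : ¬ (c < 'A' ∧ 'Z' < c) := by
  rintro ⟨h1, h2⟩
  exact absurd (lt_trans h2 h1) (by decide)

-- ---- A side: the loop computes the adjacent-duplicate check ----
theorem loopA_spec (cs : List Char) :
    ∀ k i, cs.length = i + k →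
      solutionLoopA cs (List.range' i k) =
        (if adjOk (cs.drop i) then "Likes" else "Dislikes") := by
  intro k
  induction k with
  | zero =>
    intro i h
    have hd : cs.drop i = [] := List.drop_eq_nil_of_le (by omega)
    simp [solutionLoopA, hd, adjOk]
  | succ k ih =>
    intro i h
    have hi : i < cs.length := by omega
    rw [List.range'_succ]
    have hdrop : cs.drop i = cs[i] :: cs.drop (i + 1) :=
      List.drop_eq_getElem_cons hi
    unfold solutionLoopA
    rw [if_neg (char_guard_false _)]
    by_cases hlast : i = cs.length - 1
    · -- last index: k = 0, tail of the range is empty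
      have hk : k = 0 := by omega
      have hd1 : cs.drop (i + 1) = [] := List.drop_eq_nil_of_le (by omega)
      rw [if_neg (by omega : ¬ i ≠ cs.length - 1)]
      subst hk
      simp [solutionLoopA, hdrop, hd1, adjOk]
    · have hi1 : i + 1 < cs.length := by omega
      have hdrop1 : cs.drop (i + 1) = cs[i + 1] :: cs.drop (i + 2) :=
        List.drop_eq_getElem_cons hi1
      rw [if_pos hlast]
      have hg0 : cs.getD i ' ' = cs[i] := List.getD_eq_getElem cs ' ' hi
      have hg1 : cs.getD (i + 1) ' ' = cs[i + 1] := List.getD_eq_getElem cs ' ' hi1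
      rw [hg0, hg1]
      by_cases heq : cs[i] = cs[i + 1]
      · rw [if_pos heq]
        rw [hdrop, hdrop1]
        simp [adjOk, heq]
      · rw [if_neg heq]
        rw [ih (i + 1) (by omega)]
        rw [hdrop, hdrop1]
        simp [adjOk, heq]

-- ---- B side: the fold's run list is all-ones iff no adjacent duplicates ----
theorem foldB_inv (cs : List Char) :
    ∀ (pre : List (Char × Nat)) (d : Char) (n : Nat), 1 ≤ n →
      ((cs.foldl solutionStepB (pre ++ [(d, n)])).all (fun p => p.2 == 1)) =
        (pre.all (fun p => p.2 == 1) && n == 1 && adjOk (d :: cs)) := by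
  induction cs with
  | nil =>
    intro pre d n _
    simp [adjOk, Bool.and_comm]
  | cons c cs ih =>
    intro pre d n hn
    rw [List.foldl_cons]
    have hstep : solutionStepB (pre ++ [(d, n)]) c =
        if d = c then pre ++ [(c, n + 1)] else (pre ++ [(d, n)]) ++ [(c, 1)] := by
      simp [solutionStepB]
    by_cases hdc : d = c
    · rw [hstep, if_pos hdc]
      rw [ih pre c (n + 1) (by omega)]
      have h1 : ((n + 1 : Nat) == 1) = false := by
        simp; omega
      have h2 : (d != c) = false := by simp [hdc]
      simp [adjOk, h1, h2]
    · rw [hstep, if_neg hdc]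
      rw [ih (pre ++ [(d, n)]) c 1 (by omega)]
      have h2 : (d != c) = true := by simp [hdc]
      simp [adjOk, h2, Bool.and_comm]

theorem altB_spec (cs : List Char) :
    ((cs.foldl solutionStepB []).all (fun p => p.2 == 1)) = adjOk cs := by
  cases cs with
  | nil => simp [adjOk]
  | cons c cs =>
    rw [List.foldl_cons]
    have h0 : solutionStepB [] c = [] ++ [(c, 1)] := by simp [solutionStepB]
    rw [h0, foldB_inv cs [] c 1 (by omega)]
    simp

-- ===== VERDICT (by name: the statement is the Claim_ definition above) =====
theorem solution_spec : Claim_equal_solution := by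
  intro s _
  unfold Spec_solution solution solution_alt
  rw [altB_spec]
  rw [List.range_eq_range']
  rw [loopA_spec s.toList s.toList.length 0 (by omega)]
  simp
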